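-- pv_equiv track=rewrite | github.com/diothor/dcp-python | problems/number_problems/problem_470.py | closest_larger
-- ===== SOURCE A (Python) =====
-- from typing import Union
--
-- def closest_larger(arr: list, i: int) -> Union[int, None]:
--     if not -1 < i < len(arr):
--         return None
--
--     distance = 1
--     while i + distance < len(arr) or i - distance > -1:
--         if i - distance > -1 and arr[i - distance] > arr[i]:
--             return i - distance
--         elif i + distance < len(arr) and arr[i + distance] > arr[i]:
--             return i + distance
--         else:
--             distance += 1
--     else:
--         return None
-- ===== SOURCE B (Python) =====
-- def closest_larger(arr: list, i: int):
--     if not -1 < i < len(arr):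
--         return None
--     v = arr[i]
--     dl = next((d for d in range(1, i + 1) if arr[i - d] > v), None)
--     dr = next((d for d in range(1, len(arr) - i) if arr[i + d] > v), None)
--     if dl is None:
--         return None if dr is None else i + dr
--     if dr is None:
--         return i - dl
--     return i - dl if dl <= dr else i + dr
-- ===== Notes on version B (the rewrite author's own statement) =====
-- stated objective: alternative
-- what changed: Replaced the single interleaved outward-expansion while-loop by two independent directional scans (first leftward match, first rightward match) combined at the end with a left-preferring tie-break dl <= dr.
import Mathlib
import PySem

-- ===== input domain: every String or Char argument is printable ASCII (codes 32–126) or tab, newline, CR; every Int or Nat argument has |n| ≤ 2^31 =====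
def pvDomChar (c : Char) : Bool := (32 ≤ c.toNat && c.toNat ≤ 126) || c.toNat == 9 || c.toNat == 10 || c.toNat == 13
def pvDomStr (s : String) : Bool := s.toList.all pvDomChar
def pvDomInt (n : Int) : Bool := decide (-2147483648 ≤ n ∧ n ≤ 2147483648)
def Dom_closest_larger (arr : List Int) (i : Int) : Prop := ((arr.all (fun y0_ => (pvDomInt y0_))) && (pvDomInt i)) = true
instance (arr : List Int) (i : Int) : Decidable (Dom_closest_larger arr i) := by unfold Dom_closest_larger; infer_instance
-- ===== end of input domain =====

-- B replaces A's interleaved outward-expansion loop by two independent directional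
-- scans combined with a left-preferring tie-break (objective: alternative decomposition).

-- ===== PORT A =====
-- the while loop of A; fuel = arr.length is a pure totality guard (the loop condition
-- fails once distance ≥ max(len-i, i+1) ≤ len, so the fuel is never exhausted)
def pvLoopA (arr : List Int) (i v : Int) : Nat → Int → Option Int
  | 0, _ => none
  | fuel + 1, d =>
    if i + d < (arr.length : Int) ∨ i - d > -1 then
      if i - d > -1 ∧ v < PySem.List.pyGetD arr (i - d) 0 then some (i - d)
      else if i + d < (arr.length : Int) ∧ v < PySem.List.pyGetD arr (i + d) 0 then some (i + d)
      else pvLoopA arr i v fuel (d + 1)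
    else none

def closest_larger (arr : List Int) (i : Int) : Option Int :=
  if -1 < i ∧ i < (arr.length : Int) then
    -- arr[i] is in range under the guard, so pyGetD is exact here
    pvLoopA arr i (PySem.List.pyGetD arr i 0) arr.length 1
  else none

-- ===== PORT B =====
-- next((d for d in range(..) if ..), None) = first element of the range passing the test
def pvFindL (arr : List Int) (i v d : Int) : Option Int :=
  (PySem.List.pyRange d (i + 1) 1).find? (fun x => decide (v < PySem.List.pyGetD arr (i - x) 0))

def pvFindR (arr : List Int) (i v d : Int) : Option Int :=
  (PySem.List.pyRange d ((arr.length : Int) - i) 1).find? (fun x => decide (v < PySem.List.pyGetD arr (i + x) 0))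

def pvCombine (i : Int) (dl dr : Option Int) : Option Int :=
  match dl, dr with
  | none, none => none
  | none, some r => some (i + r)
  | some l, none => some (i - l)
  | some l, some r => if l ≤ r then some (i - l) else some (i + r)

def closest_larger_alt (arr : List Int) (i : Int) : Option Int :=
  if -1 < i ∧ i < (arr.length : Int) then
    pvCombine i (pvFindL arr i (PySem.List.pyGetD arr i 0) 1)
                (pvFindR arr i (PySem.List.pyGetD arr i 0) 1)
  else none

-- ===== PRECONDITION & SPEC =====
def Spec_closest_larger (arr : List Int) (i : Int) (out : Option Int) : Prop := out = closest_larger_alt arr i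
instance (arr : List Int) (i : Int) (out : Option Int) : Decidable (Spec_closest_larger arr i out) := by unfold Spec_closest_larger; infer_instance

-- ===== CLAIM (what is proved, stated in full; the proofs are below) =====
def Claim_equal_closest_larger : Prop := ∀ (arr : List Int) (i : Int), Dom_closest_larger arr i → Spec_closest_larger arr i (closest_larger arr i)

-- ===== LEMMAS AND PROOFS =====

theorem pvFind_mem_ge {p : Int → Bool} {a b x : Int}
    (h : (PySem.List.pyRange a b 1).find? p = some x) : a ≤ x := by
  have hx := List.mem_of_find?_eq_some h
  exact (PySem.List.mem_pyRange_one.mp hx).1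

theorem pvLoopA_eq (arr : List Int) (i v : Int) :
    ∀ (fuel : Nat) (d : Int), 1 ≤ d →
      (arr.length : Int) - i ≤ d + fuel → i + 1 ≤ d + fuel →
      pvLoopA arr i v fuel d = pvCombine i (pvFindL arr i v d) (pvFindR arr i v d) := by
  intro fuel
  induction fuel with
  | zero =>
    intro d hd hR hL
    simp only [pvLoopA, pvFindL, pvFindR]
    rw [PySem.List.pyRange_one_eq_nil (by omega), PySem.List.pyRange_one_eq_nil (by omega)]
    simp [pvCombine]
  | succ fuel ih =>
    intro d hd hR hL
    simp only [pvLoopA]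
    by_cases hcond : i + d < (arr.length : Int) ∨ i - d > -1
    · rw [if_pos hcond]
      by_cases hLhit : i - d > -1 ∧ v < PySem.List.pyGetD arr (i - d) 0
      · rw [if_pos hLhit]
        have hdL : d < i + 1 := by omega
        unfold pvFindL
        rw [PySem.List.pyRange_one_cons hdL]
        rw [List.find?_cons_of_pos (by simpa using hLhit.2)]
        unfold pvCombine
        cases hfr : pvFindR arr i v d with
        | none => rfl
        | some r =>
          have : d ≤ r := pvFind_mem_ge hfr
          simp [this]
      · rw [if_neg hLhit]
        by_cases hRhit : i + d < (arr.length : Int) ∧ v < PySem.List.pyGetD arr (i + d) 0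
        · rw [if_pos hRhit]
          have hdR : d < (arr.length : Int) - i := by omega
          have hfr : pvFindR arr i v d = some d := by
            unfold pvFindR
            rw [PySem.List.pyRange_one_cons hdR]
            exact List.find?_cons_of_pos (by simpa using hRhit.2)
          rw [hfr]
          by_cases hib : i - d > -1
          · -- left head exists but fails the test
            have hnp : ¬ v < PySem.List.pyGetD arr (i - d) 0 := fun h => hLhit ⟨hib, h⟩
            unfold pvFindL
            rw [PySem.List.pyRange_one_cons (by omega : d < i + 1)]
            rw [List.find?_cons_of_neg (by simpa using hnp)]
            cases hfl : (PySem.List.pyRange (d+1) (i+1) 1).find?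
                (fun x => decide (v < PySem.List.pyGetD arr (i - x) 0)) with
            | none => rfl
            | some l =>
              have : d + 1 ≤ l := pvFind_mem_ge hfl
              simp [pvCombine]; omega
          · -- left range empty
            have hfl : pvFindL arr i v d = none := by
              unfold pvFindL
              rw [PySem.List.pyRange_one_eq_nil (by omega)]
              rfl
            rw [hfl]
            rfl
        · rw [if_neg hRhit]
          have hstep : pvLoopA arr i v fuel (d + 1) =
              pvCombine i (pvFindL arr i v (d+1)) (pvFindR arr i v (d+1)) :=
            ih (d+1) (by omega) (by omega) (by omega)
          rw [hstep]
          have heqL : pvFindL arr i v d = pvFindL arr i v (d+1) := by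
            unfold pvFindL
            by_cases hb : d < i + 1
            · rw [PySem.List.pyRange_one_cons hb]
              have hib : i - d > -1 := by omega
              have hnp : ¬ v < PySem.List.pyGetD arr (i - d) 0 := fun h => hLhit ⟨hib, h⟩
              rw [List.find?_cons_of_neg (by simpa using hnp)]
            · rw [PySem.List.pyRange_one_eq_nil (by omega),
                  PySem.List.pyRange_one_eq_nil (by omega)]
          have heqR : pvFindR arr i v d = pvFindR arr i v (d+1) := by
            unfold pvFindR
            by_cases hb : d < (arr.length : Int) - i
            · rw [PySem.List.pyRange_one_cons hb]
              have hnp : ¬ v < PySem.List.pyGetD arr (i + d) 0 := fun h => hRhit ⟨by omega, h⟩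
              rw [List.find?_cons_of_neg (by simpa using hnp)]
            · rw [PySem.List.pyRange_one_eq_nil (by omega),
                  PySem.List.pyRange_one_eq_nil (by omega)]
          rw [heqL, heqR]
    · rw [if_neg hcond]
      push_neg at hcond
      unfold pvFindL pvFindR
      rw [PySem.List.pyRange_one_eq_nil (by omega), PySem.List.pyRange_one_eq_nil (by omega)]
      rfl

-- ===== VERDICT (by name: the statement is the Claim_ definition above) =====
theorem closest_larger_spec : Claim_equal_closest_larger := by
  intro arr i _
  unfold Spec_closest_larger closest_larger closest_larger_alt
  by_cases hg : -1 < i ∧ i < (arr.length : Int)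
  · rw [if_pos hg, if_pos hg]
    exact pvLoopA_eq arr i _ arr.length 1 (by omega) (by omega) (by omega)
  · rw [if_neg hg, if_neg hg]
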